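-- pv_equiv track=rewrite | github.com/maitracle/coding-test | programmers-17681/solve.py | to_map_string
-- ===== SOURCE A (Python) =====
-- def to_map_string(n, number):
--     output = ''
--     while True:
--         if number == 1:
--             output = '#' + output
--             break
--         elif number == 0:
--             output = ' ' + output
--             break
--         elif number % 2 == 1:
--             output = '#' + output
--             number = int(number / 2)
--         else:
--             output = ' ' + output
--             number = int(number / 2)
--     return (n - len(output)) * ' ' + output
-- ===== SOURCE B (Python) =====
-- def to_map_string(n, number):
--     table = str.maketrans('10', '# ')
--     return format(number, 'b').translate(table).rjust(n)
-- ===== Notes on version B (the rewrite author's own statement) =====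
-- stated objective: idiomatic
-- what changed: Replaces the hand-written bit-extraction while-loop that prepends one '#'/' ' per step with a whole-string pipeline: format(number,'b') builds the binary string in one shot, str.translate maps digits to symbols, and rjust pads.
-- outside the precondition, e.g. on to_map_string(3, -5): A returns ' # #', B returns '-# #'
import Mathlib
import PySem

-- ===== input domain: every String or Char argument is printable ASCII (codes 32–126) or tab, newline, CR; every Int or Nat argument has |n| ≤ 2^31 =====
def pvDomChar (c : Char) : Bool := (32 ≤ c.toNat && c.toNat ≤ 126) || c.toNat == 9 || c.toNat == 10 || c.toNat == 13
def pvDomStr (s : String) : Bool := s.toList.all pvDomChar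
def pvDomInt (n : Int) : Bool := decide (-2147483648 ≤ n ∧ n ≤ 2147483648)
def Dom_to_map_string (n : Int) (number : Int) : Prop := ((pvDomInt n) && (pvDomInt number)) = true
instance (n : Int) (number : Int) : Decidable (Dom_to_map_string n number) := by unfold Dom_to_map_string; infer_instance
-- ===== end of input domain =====

-- B replaces the bit-extraction while-loop with a whole-string pipeline
-- (format → translate → rjust); idiomatic, same cost; equivalence proved for 0 ≤ number.

-- ===== PORT A =====
-- termination measure for A's loop (used by the port's decreasing_by)
theorem pvTdiv2_natAbs_lt (x : Int) (_h0 : ¬ x = 1) (_h1 : ¬ x = 0) :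
    (Int.tdiv x 2).natAbs < x.natAbs := by
  rw [Int.natAbs_tdiv]
  exact Nat.div_lt_self (by omega) (by omega)

-- the while-loop; 'int(number / 2)' is truncating division, exact here since |number| ≤ 2^31 < 2^53
def toMapLoopA (number : Int) (output : List Char) : List Char :=
  if number = 1 then '#' :: output
  else if number = 0 then ' ' :: output
  else if PySem.Int.mod number 2 = 1 then toMapLoopA (Int.tdiv number 2) ('#' :: output)
  else toMapLoopA (Int.tdiv number 2) (' ' :: output)
termination_by number.natAbs
decreasing_by
  · exact pvTdiv2_natAbs_lt number ‹¬ number = 1› ‹¬ number = 0›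
  · exact pvTdiv2_natAbs_lt number ‹¬ number = 1› ‹¬ number = 0›

def to_map_string (n : Int) (number : Int) : String :=
  let output := toMapLoopA number []
  -- (n - len(output)) * ' ' + output
  String.ofList (PySem.List.pyRepeat [' '] (n - (output.length : Int)) ++ output)

-- ===== PORT B =====
-- format(m,'b') for m ≥ 1: binary digits most-significant first (hand port, exact)
def binDigitsB (m : Nat) : List Char :=
  if m = 0 then [] else binDigitsB (m / 2) ++ [if m % 2 = 1 then '1' else '0']

-- format(number,'b'): '0' for zero, '-' prefix for negatives (hand port, exact)
def fmtBinB (x : Int) : List Char :=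
  if x < 0 then '-' :: (if x.natAbs = 0 then ['0'] else binDigitsB x.natAbs)
  else (if x.natAbs = 0 then ['0'] else binDigitsB x.natAbs)

-- .translate(str.maketrans('10', '# ')): per-character mapping (hand port, exact)
def transB (c : Char) : Char := if c = '1' then '#' else if c = '0' then ' ' else c

def to_map_string_alt (n : Int) (number : Int) : String :=
  let bits := (fmtBinB number).map transB
  -- .rjust(n): left-pad with spaces up to n (hand port, exact; no pad when n ≤ len)
  String.ofList (List.replicate (n - (bits.length : Int)).toNat ' ' ++ bits)

-- ===== PRECONDITION & SPEC =====
-- Pre_ excludes negative number, on which rendering binary is unspecified: A emits the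
-- trunc-division bit pattern of |number| with a spurious leading blank, B a '-' sign;
-- neither value is the specified one.
def Pre_to_map_string (n : Int) (number : Int) : Prop := 0 ≤ number
instance (n : Int) (number : Int) : Decidable (Pre_to_map_string n number) := by unfold Pre_to_map_string; infer_instance

def pvWitness_to_map_string : Int × Int := (5, 9)

def Spec_to_map_string (n : Int) (number : Int) (out : String) : Prop := out = to_map_string_alt n number
instance (n : Int) (number : Int) (out : String) : Decidable (Spec_to_map_string n number out) := by unfold Spec_to_map_string; infer_instance

-- ===== CLAIM (what is proved, stated in full; the proofs are below) =====
def Claim_equal_to_map_string : Prop := ∀ (n : Int) (number : Int), Dom_to_map_string n number → Pre_to_map_string n number → Spec_to_map_string n number (to_map_string n number)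

-- ===== LEMMAS AND PROOFS =====

theorem pvMod_natCast2 (m : Nat) : PySem.Int.mod (m : Int) 2 = ((m % 2 : Nat) : Int) := by
  rw [show ((2:Int)) = ((2:Nat):Int) from rfl, PySem.Int.mod_natCast]

theorem pvTdiv_natCast2 (m : Nat) : Int.tdiv (m : Int) 2 = ((m / 2 : Nat) : Int) := by
  rw [Int.tdiv_eq_ediv]
  simp

-- A's loop, run on a positive number, produces exactly B's translated binary digits (prepended).
theorem toMapLoopA_eq (m : Nat) (hm : 1 ≤ m) (out : List Char) :
    toMapLoopA (m : Int) out = (binDigitsB m).map transB ++ out := by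
  induction m using Nat.strong_induction_on generalizing out with
  | _ m ih =>
    rcases Nat.lt_or_ge m 2 with h2 | h2
    · interval_cases m
      rw [toMapLoopA]
      simp [binDigitsB, transB]
    · have hm1 : ¬ ((m : Int) = 1) := by omega
      have hm0 : ¬ ((m : Int) = 0) := by omega
      have hih := ih (m / 2) (Nat.div_lt_self (by omega) (by omega)) (by omega)
      rw [toMapLoopA, if_neg hm1, if_neg hm0, pvMod_natCast2, pvTdiv_natCast2,
          binDigitsB, if_neg (show ¬ m = 0 by omega)]
      rcases Nat.mod_two_eq_zero_or_one m with hd | hd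
      · rw [hd, if_neg (by norm_num), hih]
        simp [transB]
      · rw [hd, if_pos (by norm_num), hih]
        simp [transB]

-- ===== VERDICT (by name: the statement is the Claim_ definition above) =====
theorem to_map_string_spec : Claim_equal_to_map_string := by
  intro n number _ hpre
  obtain ⟨m, rfl⟩ := Int.eq_ofNat_of_zero_le hpre
  unfold Spec_to_map_string to_map_string to_map_string_alt
  rcases Nat.eq_zero_or_pos m with h0 | hpos
  · -- number = 0: both render the single blank
    subst h0
    rw [show ((0:Nat):Int) = (0:Int) from rfl, toMapLoopA]
    simp [fmtBinB, transB, PySem.List.pyRepeat_singleton]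
  · -- number ≥ 1: A's loop output is B's translated binary string
    rw [toMapLoopA_eq m hpos []]
    have hfmt : fmtBinB (m : Int) = binDigitsB m := by
      unfold fmtBinB
      rw [if_neg (by omega), if_neg (by simp; omega)]
      simp
    simp [hfmt, PySem.List.pyRepeat_singleton]
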